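-- pv_equiv track=rewrite | github.com/wookgugu/PS2 | programmers/Lv_1/부족한_금액_계산하기.py | solution
-- ===== SOURCE A (Python) =====
-- def solution(price, money, count):
--     p = 0
--     while count > 0 :
--         p += price
--         money -= p
--         count -= 1
--     if money >= 0 :
--         return 0
--     else :
--         return money * -1
-- ===== SOURCE B (Python) =====
-- def solution(price, money, count):
--     total = price * count * (count + 1) // 2
--     diff = total - money
--     return diff if diff > 0 else 0
-- ===== Notes on version B (the rewrite author's own statement) =====
-- stated objective: faster
-- what changed: Replaces the O(count) while-loop accumulating rising ride prices by the arithmetic-series closed form price*count*(count+1)//2.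
-- outside the precondition, e.g. on solution(3, -5, -2): A returns 5, B returns 8
import Mathlib
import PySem

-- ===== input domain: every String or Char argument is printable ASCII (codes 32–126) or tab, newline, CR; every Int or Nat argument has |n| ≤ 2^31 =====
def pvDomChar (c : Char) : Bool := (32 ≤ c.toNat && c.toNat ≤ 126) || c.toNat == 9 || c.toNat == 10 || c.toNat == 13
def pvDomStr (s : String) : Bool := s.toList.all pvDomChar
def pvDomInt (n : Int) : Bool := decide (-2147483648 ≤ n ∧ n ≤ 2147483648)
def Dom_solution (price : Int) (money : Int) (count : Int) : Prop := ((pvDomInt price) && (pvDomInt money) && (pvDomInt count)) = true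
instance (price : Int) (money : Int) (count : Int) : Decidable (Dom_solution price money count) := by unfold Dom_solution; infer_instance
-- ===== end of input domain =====

-- B replaces A's O(count) accumulation loop by the arithmetic-series closed form (faster, asymptotic).

-- ===== PORT A =====
-- the while loop: state (p, money, count); returns the final money
def solutionLoop (price : Int) (p : Int) (money : Int) (count : Int) : Int :=
  if 0 < count then
    solutionLoop price (p + price) (money - (p + price)) (count - 1)
  else money
termination_by count.toNat
decreasing_by omega

def solution (price : Int) (money : Int) (count : Int) : Int :=
  let m := solutionLoop price 0 money count
  if m ≥ 0 then 0 else m * -1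

-- ===== PORT B =====
def solution_alt (price : Int) (money : Int) (count : Int) : Int :=
  let total := PySem.Int.floordiv (price * count * (count + 1)) 2
  let diff := total - money
  if diff > 0 then diff else 0

-- ===== PRECONDITION & SPEC =====
-- Pre_ restricts to the task's natural domain (a number of rides): on negative count A's loop
-- never runs and the closed-form reading is meaningless, so those inputs are excluded.
def Pre_solution (price : Int) (money : Int) (count : Int) : Prop := 0 ≤ count
instance (price : Int) (money : Int) (count : Int) : Decidable (Pre_solution price money count) := by unfold Pre_solution; infer_instance
def pvWitness_solution : Int × Int × Int := (3, 20, 4)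

def Spec_solution (price : Int) (money : Int) (count : Int) (out : Int) : Prop := out = solution_alt price money count
instance (price : Int) (money : Int) (count : Int) (out : Int) : Decidable (Spec_solution price money count out) := by unfold Spec_solution; infer_instance

-- ===== CLAIM (what is proved, stated in full; the proofs are below) =====
def Claim_equal_solution : Prop := ∀ (price : Int) (money : Int) (count : Int), Dom_solution price money count → Pre_solution price money count → Spec_solution price money count (solution price money count)

-- ===== LEMMAS AND PROOFS =====

-- loop invariant: doubled to avoid division; after the loop, money has dropped by
-- 2*count*p + price*count*(count+1) over two
theorem solutionLoop_eq (n : Nat) : ∀ (price p money : Int),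
    2 * solutionLoop price p money (n : Int) = 2 * money - 2 * (n : Int) * p - price * (n : Int) * ((n : Int) + 1) := by
  induction n with
  | zero => intro price p money; unfold solutionLoop; norm_num
  | succ k ih =>
    intro price p money
    unfold solutionLoop
    have h : (0 : Int) < ((k + 1 : Nat) : Int) := by exact_mod_cast Nat.succ_pos k
    rw [if_pos h]
    have hc : ((k + 1 : Nat) : Int) - 1 = (k : Int) := by push_cast; ring
    rw [hc, ih]
    push_cast
    ring

theorem solution_spec : Claim_equal_solution := by
  intro price money count _ hpre
  unfold Pre_solution at hpre
  obtain ⟨n, rfl⟩ := Int.eq_ofNat_of_zero_le hpre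
  unfold Spec_solution solution solution_alt
  have h2 := solutionLoop_eq n price 0 money
  have hdiv : PySem.Int.floordiv (price * (n : Int) * ((n : Int) + 1)) 2
      = money - solutionLoop price 0 money (n : Int) := by
    rw [PySem.Int.floordiv_eq_ediv_of_pos (by norm_num)]
    have : price * (n : Int) * ((n : Int) + 1) = 2 * (money - solutionLoop price 0 money (n : Int)) := by
      omega
    rw [this, Int.mul_ediv_cancel_left _ (by norm_num)]
  simp only [hdiv]
  set m := solutionLoop price 0 money (n : Int) with hm
  by_cases h : m ≥ 0
  · rw [if_pos h, if_neg (by omega)]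
  · rw [if_neg h, if_pos (by omega)]
    omega
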